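-- pv_equiv track=rewrite | github.com/kiso-run/core | kiso/brain.py | _group_facts_by_category
-- ===== SOURCE A (Python) =====
-- _FACT_CHAR_LIMIT = 200
--
-- def _group_facts_by_category(fact_list: list[dict], label_session: bool = False) -> list[str]:
--     """Group facts by category and return formatted section parts."""
--     cats: dict[str, list[str]] = {"project": [], "user": [], "tool": [], "general": []}
--     for f in fact_list:
--         cat = f.get("category", "general")
--         if cat not in cats:
--             cat = "general"
--         content = f['content']
--         if len(content) > _FACT_CHAR_LIMIT:
--             content = content[:_FACT_CHAR_LIMIT] + "…"
--         line = f"- {content}"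
--         if label_session and f.get("session"):
--             line += f" [session:{f['session']}]"
--         cats[cat].append(line)
--     parts: list[str] = []
--     for cat in ("project", "user", "tool", "general"):
--         if cats[cat]:
--             parts.append(f"### {cat.title()}\n" + "\n".join(cats[cat]))
--     return parts
-- ===== SOURCE B (Python) =====
-- _FACT_CHAR_LIMIT = 200
--
-- _CATS = ("project", "user", "tool", "general")
--
--
-- def _resolve_category(f: dict) -> str:
--     cat = f.get("category", "general")
--     return cat if cat in _CATS else "general"
--
--
-- def _format_fact(f: dict, label_session: bool) -> str:
--     content = f['content']
--     if len(content) > _FACT_CHAR_LIMIT: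
--         content = content[:_FACT_CHAR_LIMIT] + "…"
--     line = f"- {content}"
--     if label_session and f.get("session"):
--         line += f" [session:{f['session']}]"
--     return line
--
--
-- def _group_facts_by_category(fact_list: list[dict], label_session: bool = False) -> list[str]:
--     """Per-category scan over fact_list; no grouping dict is built."""
--     parts: list[str] = []
--     for cat, title in (("project", "Project"), ("user", "User"),
--                        ("tool", "Tool"), ("general", "General")):
--         lines = [_format_fact(f, label_session) for f in fact_list
--                  if _resolve_category(f) == cat]
--         if lines:
--             parts.append(f"### {title}\n" + "\n".join(lines))
--     return parts
-- ===== Notes on version B (the rewrite author's own statement) =====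
-- stated objective: simpler
-- what changed: Replaces the single-pass grouping dict with a per-category scan: for each of the four fixed categories B filters the fact list by resolved category and formats the matches, emitting a section when non-empty; no dict is built.
-- outside the precondition, e.g. on _group_facts_by_category([{}], False): A raises KeyError, B raises KeyError
import Mathlib
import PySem

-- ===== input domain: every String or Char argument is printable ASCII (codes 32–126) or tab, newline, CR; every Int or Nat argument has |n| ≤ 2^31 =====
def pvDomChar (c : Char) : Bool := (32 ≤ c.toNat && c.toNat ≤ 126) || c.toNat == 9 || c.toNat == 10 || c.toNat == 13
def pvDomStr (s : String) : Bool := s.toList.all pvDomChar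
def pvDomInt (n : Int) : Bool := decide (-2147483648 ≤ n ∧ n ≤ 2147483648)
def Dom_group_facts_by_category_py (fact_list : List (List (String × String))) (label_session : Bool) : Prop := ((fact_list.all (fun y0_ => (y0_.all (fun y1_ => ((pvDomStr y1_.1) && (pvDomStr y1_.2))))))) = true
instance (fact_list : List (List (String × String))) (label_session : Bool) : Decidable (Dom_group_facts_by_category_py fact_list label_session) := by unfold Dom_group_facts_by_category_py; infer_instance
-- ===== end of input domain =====

-- B drops A's grouping dict and instead scans the fact list once per fixed category (simpler decomposition, same output).

-- dict lookup f.get(k) on a fact (assoc list, first match)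
def pvFGet (f : List (String × String)) (k : String) : Option String :=
  (f.find? (fun p => p.1 == k)).map (·.2)

-- the line both Pythons format for one fact (identical code in A and in B's helper _format_fact)
def pvLine (label_session : Bool) (f : List (String × String)) : String :=
  let content := (pvFGet f "content").getD ""   -- f['content']; Pre_ guarantees the key is present
  let content := if PySem.Str.len content > 200 then PySem.Str.slice content none (some 200) ++ "…" else content
  let line := "- " ++ content
  if label_session && ((pvFGet f "session").getD "" != "") then
    line ++ " [session:" ++ (pvFGet f "session").getD "" ++ "]"
  else line

-- ===== PORT A =====
-- str.title() of an all-lowercase single word (exact for the four category literals A applies it to)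
def pvTitle (s : String) : String :=
  match s.toList with
  | [] => ""
  | c :: rest => String.ofList (c.toUpper :: rest)

def group_facts_by_category_py (fact_list : List (List (String × String))) (label_session : Bool) : List String :=
  let cats := fact_list.foldl (fun cats f =>
      let cat0 := (pvFGet f "category").getD "general"
      let cat := if cats.contains cat0 then cat0 else "general"
      cats.modify cat [] (· ++ [pvLine label_session f]))
    (PySem.Dict.mk [("project", ([] : List String)), ("user", []), ("tool", []), ("general", [])])
  ["project", "user", "tool", "general"].foldl (fun parts cat =>
      if (cats.getD cat []).isEmpty then parts
      else parts ++ ["### " ++ pvTitle cat ++ "\n" ++ PySem.Str.join "\n" (cats.getD cat [])]) []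

-- ===== PORT B =====
def pvResolve (f : List (String × String)) : String :=
  let cat := (pvFGet f "category").getD "general"
  if cat == "project" || cat == "user" || cat == "tool" || cat == "general" then cat else "general"

def group_facts_by_category_py_alt (fact_list : List (List (String × String))) (label_session : Bool) : List String :=
  [("project", "Project"), ("user", "User"), ("tool", "Tool"), ("general", "General")].foldl
    (fun parts ct =>
      let lines := (fact_list.filter (fun f => pvResolve f == ct.1)).map (pvLine label_session)
      if lines.isEmpty then parts
      else parts ++ ["### " ++ ct.2 ++ "\n" ++ PySem.Str.join "\n" lines]) []

-- ===== PRECONDITION & SPEC =====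
-- Pre_ excludes facts lacking a 'content' key, on which both Pythons raise KeyError.
def Pre_group_facts_by_category_py (fact_list : List (List (String × String))) (label_session : Bool) : Prop :=
  ∀ f ∈ fact_list, (f.find? (fun p => p.1 == "content")).isSome

instance (fact_list : List (List (String × String))) (label_session : Bool) : Decidable (Pre_group_facts_by_category_py fact_list label_session) := by unfold Pre_group_facts_by_category_py; infer_instance

def pvWitness_group_facts_by_category_py : (List (List (String × String))) × Bool :=
  ([[("content", "hi"), ("category", "tool"), ("session", "s1")], [("content", "x")]], true)

def Spec_group_facts_by_category_py (fact_list : List (List (String × String))) (label_session : Bool) (out : List String) : Prop := out = group_facts_by_category_py_alt fact_list label_session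
instance (fact_list : List (List (String × String))) (label_session : Bool) (out : List String) : Decidable (Spec_group_facts_by_category_py fact_list label_session out) := by unfold Spec_group_facts_by_category_py; infer_instance

-- ===== CLAIM (what is proved, stated in full; the proofs are below) =====
def Claim_equal_group_facts_by_category_py : Prop := ∀ (fact_list : List (List (String × String))) (label_session : Bool), Dom_group_facts_by_category_py fact_list label_session → Pre_group_facts_by_category_py fact_list label_session → Spec_group_facts_by_category_py fact_list label_session (group_facts_by_category_py fact_list label_session)

-- ===== LEMMAS AND PROOFS =====

def pvFourPred (k : String) : Bool :=
  k == "project" || k == "user" || k == "tool" || k == "general"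

-- A's grouping fold, per key: equals B's filter-and-map, provided the dict's key set is the four fixed categories
theorem pv_fold_getD (ls : Bool) (l : List (List (String × String)))
    (d : PySem.Dict String (List String))
    (h : ∀ k, d.contains k = pvFourPred k) (c : String) :
    (l.foldl (fun cats f =>
        let cat0 := (pvFGet f "category").getD "general"
        let cat := if cats.contains cat0 then cat0 else "general"
        cats.modify cat [] (· ++ [pvLine ls f])) d).getD c []
      = d.getD c [] ++ (l.filter (fun f => pvResolve f == c)).map (pvLine ls) := by
  induction l generalizing d with
  | nil => simp
  | cons f rest ih =>
    simp only [List.foldl]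
    have hcat : (if d.contains ((pvFGet f "category").getD "general")
        then (pvFGet f "category").getD "general" else "general") = pvResolve f := by
      rw [h]; unfold pvResolve pvFourPred; split_ifs <;> simp_all
    have hfour : pvFourPred (pvResolve f) = true := by
      by_cases h4 : ((pvFGet f "category").getD "general" == "project"
          || (pvFGet f "category").getD "general" == "user"
          || (pvFGet f "category").getD "general" == "tool"
          || (pvFGet f "category").getD "general" == "general") = true
      · simp [pvResolve, pvFourPred, h4]
      · simp [pvResolve, pvFourPred, h4]
    rw [hcat, ih _ (fun k => by
      rw [PySem.Dict.contains_modify, h]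
      by_cases hk : k = pvResolve f
      · subst hk; simp [hfour]
      · simp [hk])]
    rw [PySem.Dict.getD_modify]
    by_cases hc : c = pvResolve f
    · subst hc
      rw [if_pos rfl, List.filter_cons_of_pos (by simp), List.map_cons,
        List.append_assoc, List.singleton_append]
    · rw [if_neg hc, List.filter_cons_of_neg (by
        simp only [beq_iff_eq]
        exact fun hh => hc hh.symm)]

theorem group_facts_by_category_py_spec_aux (fact_list : List (List (String × String))) (label_session : Bool) :
    group_facts_by_category_py fact_list label_session = group_facts_by_category_py_alt fact_list label_session := by
  unfold group_facts_by_category_py group_facts_by_category_py_alt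
  have hinit : ∀ k, (PySem.Dict.mk [("project", ([] : List String)), ("user", []), ("tool", []), ("general", [])]).contains k = pvFourPred k := by
    intro k
    rw [PySem.Dict.contains_mk]
    unfold pvFourPred
    simp only [List.any_cons, List.any_nil, Bool.or_false]
    rw [Bool.eq_iff_iff]
    simp only [Bool.or_eq_true, beq_iff_eq]
    constructor
    · rintro (h | h | h | h) <;> subst h <;> simp
    · rintro (((h | h) | h) | h) <;> subst h <;> simp
  simp only [List.foldl]
  rw [pv_fold_getD label_session fact_list _ hinit "project",
      pv_fold_getD label_session fact_list _ hinit "user",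
      pv_fold_getD label_session fact_list _ hinit "tool",
      pv_fold_getD label_session fact_list _ hinit "general"]
  have e1 : (PySem.Dict.mk [("project", ([] : List String)), ("user", []), ("tool", []), ("general", [])]).getD "project" [] = [] := by decide
  have e2 : (PySem.Dict.mk [("project", ([] : List String)), ("user", []), ("tool", []), ("general", [])]).getD "user" [] = [] := by decide
  have e3 : (PySem.Dict.mk [("project", ([] : List String)), ("user", []), ("tool", []), ("general", [])]).getD "tool" [] = [] := by decide
  have e4 : (PySem.Dict.mk [("project", ([] : List String)), ("user", []), ("tool", []), ("general", [])]).getD "general" [] = [] := by decide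
  rw [e1, e2, e3, e4]
  have ht1 : pvTitle "project" = "Project" := by decide
  have ht2 : pvTitle "user" = "User" := by decide
  have ht3 : pvTitle "tool" = "Tool" := by decide
  have ht4 : pvTitle "general" = "General" := by decide
  simp only [List.nil_append, ht1, ht2, ht3, ht4]

-- ===== VERDICT (by name: the statement is the Claim_ definition above) =====
theorem group_facts_by_category_py_spec : Claim_equal_group_facts_by_category_py := by
  intro fact_list label_session _ _
  exact group_facts_by_category_py_spec_aux fact_list label_session
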